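-- pv_equiv track=rewrite | github.com/zapnikita95/whisper | whisper_vocab.py | _match_profile_key
-- ===== SOURCE A (Python) =====
-- from typing import Any
--
-- def _match_profile_key(profiles: dict[str, Any], app_name: str | None) -> str | None:
--     if not app_name:
--         return None
--     name = app_name.strip().lower()
--     if not name:
--         return None
--     for key in profiles.keys():
--         if key.strip().lower() == name:
--             return key
--     for key in profiles.keys():
--         low = key.strip().lower()
--         if low and (low in name or name in low):
--             return key
--     return None
-- ===== SOURCE B (Python) =====
-- from typing import Any
--
-- def _match_profile_key(profiles: dict[str, Any], app_name: str | None) -> str | None: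
--     if not app_name:
--         return None
--     name = app_name.strip().lower()
--     if not name:
--         return None
--     exact = None
--     sub = None
--     for key in reversed(list(profiles.keys())):
--         low = key.strip().lower()
--         if low == name:
--             exact = key
--         elif low and (low in name or name in low):
--             sub = key
--     return exact if exact is not None else sub
-- ===== Notes on version B (the rewrite author's own statement) =====
-- stated objective: alternative
-- what changed: Replaces A's two early-returning forward scans by a single total backward fold over the keys that maintains both the earliest exact match and the earliest substring match as overwriting accumulators, then picks exact over substring at the end.
import Mathlib
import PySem

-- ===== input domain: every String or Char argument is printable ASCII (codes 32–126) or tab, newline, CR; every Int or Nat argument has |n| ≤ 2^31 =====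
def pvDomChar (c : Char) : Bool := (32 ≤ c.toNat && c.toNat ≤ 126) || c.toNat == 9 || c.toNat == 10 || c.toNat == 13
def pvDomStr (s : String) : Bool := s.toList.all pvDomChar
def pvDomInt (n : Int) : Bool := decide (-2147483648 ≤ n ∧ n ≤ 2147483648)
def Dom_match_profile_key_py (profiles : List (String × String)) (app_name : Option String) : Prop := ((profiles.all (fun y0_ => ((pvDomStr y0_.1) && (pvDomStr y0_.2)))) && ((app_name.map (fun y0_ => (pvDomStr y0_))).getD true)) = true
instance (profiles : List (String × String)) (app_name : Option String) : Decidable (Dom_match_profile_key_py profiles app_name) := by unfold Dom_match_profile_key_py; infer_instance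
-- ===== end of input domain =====

-- B replaces A's two early-returning forward scans by one total backward fold keeping the earliest exact and substring matches (alternative decomposition, same results; B always scans all keys where A may exit early).

-- ===== PORT A =====
-- first loop: return the first key whose stripped+lowered form equals name
def pvLoop1 (keys : List String) (name : String) : Option String :=
  match keys with
  | [] => none
  | k :: rest =>
    if PySem.Str.lower (PySem.Str.strip k) = name then some k else pvLoop1 rest name

-- second loop: return the first key with truthy low and a substring relation with name
def pvLoop2 (keys : List String) (name : String) : Option String :=
  match keys with
  | [] => none
  | k :: rest =>
    let low := PySem.Str.lower (PySem.Str.strip k)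
    if low ≠ "" ∧ (PySem.Str.isIn low name = true ∨ PySem.Str.isIn name low = true) then
      some k
    else pvLoop2 rest name

def match_profile_key_py (profiles : List (String × String)) (app_name : Option String) : Option String :=
  match app_name with
  | none => none
  | some s =>
    if s = "" then none
    else
      let name := PySem.Str.lower (PySem.Str.strip s)
      if name = "" then none
      else
        match pvLoop1 (PySem.Dict.ofList profiles).keys name with
        | some k => some k
        | none => pvLoop2 (PySem.Dict.ofList profiles).keys name

-- ===== PORT B =====
-- Source B's reversed loop with overwriting accumulators (exact, sub) is exactly a right fold
-- over the key list: the last key is processed first, earlier keys overwrite later ones.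
def pvScanB : List String → String → Option String × Option String
  | [], _ => (none, none)
  | k :: rest, name =>
    let acc := pvScanB rest name
    let low := PySem.Str.lower (PySem.Str.strip k)
    if low = name then (some k, acc.2)
    else if low ≠ "" ∧ (PySem.Str.isIn low name = true ∨ PySem.Str.isIn name low = true) then
      (acc.1, some k)
    else acc

def match_profile_key_py_alt (profiles : List (String × String)) (app_name : Option String) : Option String :=
  match app_name with
  | none => none
  | some s =>
    if s = "" then none
    else
      let name := PySem.Str.lower (PySem.Str.strip s)
      if name = "" then none
      else
        let p := pvScanB (PySem.Dict.ofList profiles).keys name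
        match p.1 with
        | some e => some e
        | none => p.2

-- ===== PRECONDITION & SPEC =====
def Spec_match_profile_key_py (profiles : List (String × String)) (app_name : Option String) (out : Option String) : Prop := out = match_profile_key_py_alt profiles app_name
instance (profiles : List (String × String)) (app_name : Option String) (out : Option String) : Decidable (Spec_match_profile_key_py profiles app_name out) := by unfold Spec_match_profile_key_py; infer_instance

-- ===== CLAIM (what is proved, stated in full; the proofs are below) =====
def Claim_equal_match_profile_key_py : Prop := ∀ (profiles : List (String × String)) (app_name : Option String), Dom_match_profile_key_py profiles app_name → Spec_match_profile_key_py profiles app_name (match_profile_key_py profiles app_name)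

-- ===== LEMMAS AND PROOFS =====
theorem pvScanB_fst (keys : List String) (name : String) :
    (pvScanB keys name).1 = pvLoop1 keys name := by
  induction keys with
  | nil => rfl
  | cons k rest ih =>
    show ((let acc := pvScanB rest name
           let low := PySem.Str.lower (PySem.Str.strip k)
           if low = name then (some k, acc.2)
           else if low ≠ "" ∧ (PySem.Str.isIn low name = true ∨ PySem.Str.isIn name low = true) then
             (acc.1, some k)
           else acc) : Option String × Option String).1 =
      (if PySem.Str.lower (PySem.Str.strip k) = name then some k else pvLoop1 rest name)
    by_cases h1 : PySem.Str.lower (PySem.Str.strip k) = name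
    · rw [if_pos h1, if_pos h1]
    · rw [if_neg h1]
      by_cases h2 : PySem.Str.lower (PySem.Str.strip k) ≠ "" ∧
          (PySem.Str.isIn (PySem.Str.lower (PySem.Str.strip k)) name = true ∨
           PySem.Str.isIn name (PySem.Str.lower (PySem.Str.strip k)) = true)
      · rw [if_neg h1, if_pos h2]; exact ih
      · rw [if_neg h1, if_neg h2]; exact ih

theorem pvScanB_snd (keys : List String) (name : String)
    (hno : pvLoop1 keys name = none) :
    (pvScanB keys name).2 = pvLoop2 keys name := by
  induction keys with
  | nil => rfl
  | cons k rest ih =>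
    have h1 : ¬ PySem.Str.lower (PySem.Str.strip k) = name := by
      intro h; simp [pvLoop1, h] at hno
    have hrest : pvLoop1 rest name = none := by
      simpa [pvLoop1, h1] using hno
    show ((let acc := pvScanB rest name
           let low := PySem.Str.lower (PySem.Str.strip k)
           if low = name then (some k, acc.2)
           else if low ≠ "" ∧ (PySem.Str.isIn low name = true ∨ PySem.Str.isIn name low = true) then
             (acc.1, some k)
           else acc) : Option String × Option String).2 =
      (if PySem.Str.lower (PySem.Str.strip k) ≠ "" ∧
          (PySem.Str.isIn (PySem.Str.lower (PySem.Str.strip k)) name = true ∨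
           PySem.Str.isIn name (PySem.Str.lower (PySem.Str.strip k)) = true) then some k
       else pvLoop2 rest name)
    by_cases h2 : PySem.Str.lower (PySem.Str.strip k) ≠ "" ∧
        (PySem.Str.isIn (PySem.Str.lower (PySem.Str.strip k)) name = true ∨
         PySem.Str.isIn name (PySem.Str.lower (PySem.Str.strip k)) = true)
    · rw [if_neg h1, if_pos h2, if_pos h2]
    · rw [if_neg h1, if_neg h2, if_neg h2]; exact ih hrest

-- ===== VERDICT (by name: the statement is the Claim_ definition above) =====
theorem match_profile_key_py_spec : Claim_equal_match_profile_key_py := by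
  intro profiles app_name _
  unfold Spec_match_profile_key_py match_profile_key_py match_profile_key_py_alt
  cases app_name with
  | none => rfl
  | some s =>
    by_cases hs : s = ""
    · simp [hs]
    · by_cases hn : PySem.Str.lower (PySem.Str.strip s) = ""
      · simp [hs, hn]
      · simp only [hs, hn, if_false]
        set keys := (PySem.Dict.ofList profiles).keys
        set name := PySem.Str.lower (PySem.Str.strip s)
        rw [pvScanB_fst]
        cases h : pvLoop1 keys name with
        | some k => simp
        | none => simp [pvScanB_snd keys name h]
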